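-- pv_equiv track=rewrite | github.com/Ahmet-Acik/master_python | src/loops.py | while_loop_with_break
-- ===== SOURCE A (Python) =====
-- def while_loop_with_break(limit):
--     """
--     Uses the break statement to exit the loop when a condition is met.
--     """
--     result = []
--     i = 1
--     while i < limit:
--         result.append(i)
--         if i == 3:
--             break
--         i += 1
--     return result
-- ===== SOURCE B (Python) =====
-- def while_loop_with_break(limit):
--     """Closed form: only 1, 2, 3 can ever be appended (break at i == 3)."""
--     return [i for i in (1, 2, 3) if i < limit]
-- ===== Notes on version B (the rewrite author's own statement) =====
-- stated objective: simpler
-- what changed: Replaces the incremental while-loop with break by a closed-form filter over the fixed tuple of the only three appendable values, since the break caps the list.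
import Mathlib
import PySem

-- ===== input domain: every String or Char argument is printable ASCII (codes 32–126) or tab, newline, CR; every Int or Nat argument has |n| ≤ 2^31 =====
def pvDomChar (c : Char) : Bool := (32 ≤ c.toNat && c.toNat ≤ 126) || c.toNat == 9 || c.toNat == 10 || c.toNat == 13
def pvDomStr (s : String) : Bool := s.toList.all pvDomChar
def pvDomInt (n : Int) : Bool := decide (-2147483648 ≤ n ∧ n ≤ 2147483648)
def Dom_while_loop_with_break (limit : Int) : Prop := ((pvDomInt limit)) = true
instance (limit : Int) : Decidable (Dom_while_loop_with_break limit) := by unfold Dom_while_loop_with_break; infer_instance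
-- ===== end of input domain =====

-- B replaces A's while-loop-with-break by a closed-form filter over [1,2,3]; return values proved equal for all int limits.

-- ===== PORT A =====
-- literal port of the while loop: state (i, result), break when i == 3
def pvLoopA (limit i : Int) (result : List Int) : List Int :=
  if _h : i < limit then
    let result' := result ++ [i]
    if i = 3 then result' else pvLoopA limit (i + 1) result'
  else result
termination_by (limit - i).toNat
decreasing_by omega

def while_loop_with_break (limit : Int) : List Int :=
  pvLoopA limit 1 []

-- ===== PORT B =====
def while_loop_with_break_alt (limit : Int) : List Int :=
  ([1, 2, 3] : List Int).filter (fun i => i < limit)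

-- ===== PRECONDITION & SPEC =====
def Spec_while_loop_with_break (limit : Int) (out : List Int) : Prop := out = while_loop_with_break_alt limit
instance (limit : Int) (out : List Int) : Decidable (Spec_while_loop_with_break limit out) := by unfold Spec_while_loop_with_break; infer_instance

-- ===== CLAIM (what is proved, stated in full; the proofs are below) =====
def Claim_equal_while_loop_with_break : Prop := ∀ (limit : Int), Dom_while_loop_with_break limit → Spec_while_loop_with_break limit (while_loop_with_break limit)

-- ===== LEMMAS AND PROOFS =====

theorem pvLoopA_eq_filter (limit : Int) :
    pvLoopA limit 1 [] = ([1, 2, 3] : List Int).filter (fun i => i < limit) := by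
  by_cases h1 : (1 : Int) < limit
  · by_cases h2 : (2 : Int) < limit
    · by_cases h3 : (3 : Int) < limit
      · rw [pvLoopA]; simp only [h1, dite_true]
        norm_num
        rw [pvLoopA]; simp only [h2, dite_true]
        norm_num
        rw [pvLoopA]; simp only [h3, dite_true]
        simp [List.filter, h1, h2, h3]
      · rw [pvLoopA]; simp only [h1, dite_true]
        norm_num
        rw [pvLoopA]; simp only [h2, dite_true]
        norm_num
        rw [pvLoopA]; simp only [h3, dite_false]
        simp [List.filter, h1, h2, h3]
    · rw [pvLoopA]; simp only [h1, dite_true]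
      norm_num
      rw [pvLoopA]; simp only [h2, dite_false]
      have h3 : ¬ (3 : Int) < limit := by omega
      simp [List.filter, h1, h2, h3]
  · rw [pvLoopA]; simp only [h1, dite_false]
    have h2 : ¬ (2 : Int) < limit := by omega
    have h3 : ¬ (3 : Int) < limit := by omega
    simp [List.filter, h1, h2, h3]

-- ===== VERDICT (by name: the statement is the Claim_ definition above) =====
theorem while_loop_with_break_spec : Claim_equal_while_loop_with_break := by
  intro limit _
  show while_loop_with_break limit = while_loop_with_break_alt limit
  unfold while_loop_with_break while_loop_with_break_alt
  exact pvLoopA_eq_filter limit
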